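-- pv_equiv track=rewrite | github.com/veligaram/pythonProject | scaler39.6.py | varyiing
-- ===== SOURCE A (Python) =====
-- def varyiing(lst):
--     result=[]
--     nested_list=lst
--     for i in range(len(nested_list)):
--         for j in range(len(nested_list)):
--             sorted_list=sorted(nested_list[i],key=lambda x: x.count('a'),reverse=True)
--         result.append(sorted_list)
--     return result
-- ===== SOURCE B (Python) =====
-- def varyiing(lst):
--     result = []
--     for sub in lst:
--         buckets = {}
--         for x in sub:
--             buckets.setdefault(x.count('a'), []).append(x)
--         out = []
--         for k in sorted(buckets, reverse=True):
--             out += buckets[k]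
--         result.append(out)
--     return result
-- ===== Notes on version B (the rewrite author's own statement) =====
-- stated objective: faster
-- what changed: Replaces the redundant quadratic loop nest that re-sorts each sublist len(lst) times by a comparison sort with a single pass per sublist that groups elements into count-of-'a' buckets in a dict and concatenates the buckets over the distinct counts in descending order.
import Mathlib
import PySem

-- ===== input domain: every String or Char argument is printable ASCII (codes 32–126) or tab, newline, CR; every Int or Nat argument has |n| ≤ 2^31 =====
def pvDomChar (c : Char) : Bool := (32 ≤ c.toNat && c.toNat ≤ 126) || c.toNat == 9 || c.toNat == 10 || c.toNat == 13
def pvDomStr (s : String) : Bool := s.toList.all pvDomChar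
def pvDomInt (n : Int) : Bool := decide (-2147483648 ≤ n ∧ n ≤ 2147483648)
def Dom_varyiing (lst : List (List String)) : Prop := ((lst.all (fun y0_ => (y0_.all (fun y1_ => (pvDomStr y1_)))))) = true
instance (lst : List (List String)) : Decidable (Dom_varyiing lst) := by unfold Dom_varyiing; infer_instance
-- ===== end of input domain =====

-- B replaces A's redundant quadratic loop nest (each sublist is re-sorted len(lst) times) by one
-- grouping pass per sublist into count-of-'a' buckets concatenated over descending distinct counts.

-- ===== PORT A =====
-- Python A: nested loops over range(len(lst)); the inner loop reassigns sorted_list each time.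
-- sorted_list before its first assignment is modelled as an Option (none = unassigned; the
-- append only ever happens after the inner loop ran at least once, so the .getD [] is unreachable).
def varyiing (lst : List (List String)) : List (List String) :=
  let nested_list := lst
  ((List.range nested_list.length).foldl
    (fun (st : List (List String) × Option (List String)) i =>
      let sorted_list := (List.range nested_list.length).foldl
        (fun _ _j => some (PySem.List.sorted (nested_list.getD i [])
          (fun x => (PySem.Str.count x "a" : Int)) true)) st.2
      (st.1 ++ [sorted_list.getD []], sorted_list))
    ([], none)).1

-- ===== PORT B =====
def varyiing_alt (lst : List (List String)) : List (List String) :=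
  lst.map (fun sub =>
    let buckets := sub.foldl
      (fun d x => d.modify ((PySem.Str.count x "a" : Int)) [] (· ++ [x])) PySem.Dict.empty
    (PySem.List.sorted buckets.keys (fun k => k) true).flatMap
      (fun k => buckets.getD k []))

-- ===== PRECONDITION & SPEC =====
def Spec_varyiing (lst : List (List String)) (out : List (List String)) : Prop := out = varyiing_alt lst
instance (lst : List (List String)) (out : List (List String)) : Decidable (Spec_varyiing lst out) := by unfold Spec_varyiing; infer_instance

-- ===== CLAIM (what is proved, stated in full; the proofs are below) =====
def Claim_equal_varyiing : Prop := ∀ (lst : List (List String)), Dom_varyiing lst → Spec_varyiing lst (varyiing lst)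

-- ===== LEMMAS AND PROOFS =====

-- insert a key into a strictly descending list of keys (proof-side mirror of B's key order)
def descInsert (k : Int) : List Int → List Int
  | [] => [k]
  | d :: t => if d < k then k :: d :: t else if d = k then d :: t else d :: descInsert k t

theorem mem_descInsert (k a : Int) (D : List Int) : a ∈ descInsert k D ↔ a = k ∨ a ∈ D := by
  induction D with
  | nil => simp [descInsert]
  | cons d t ih =>
    simp only [descInsert]
    split_ifs with h1 h2
    · simp [List.mem_cons]
    · subst h2; simp [List.mem_cons]
    · simp [List.mem_cons, ih]; tauto

theorem pairwise_descInsert (k : Int) (D : List Int) (h : D.Pairwise (· > ·)) :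
    (descInsert k D).Pairwise (· > ·) := by
  induction D with
  | nil => simp [descInsert]
  | cons d t ih =>
    rcases List.pairwise_cons.mp h with ⟨hd, ht⟩
    simp only [descInsert]
    split_ifs with h1 h2
    · refine List.pairwise_cons.mpr ⟨?_, h⟩
      intro b hb
      rcases List.mem_cons.mp hb with rfl | hb
      · exact h1
      · exact lt_trans (hd b hb) h1
    · exact h
    · refine List.pairwise_cons.mpr ⟨?_, ih ht⟩
      intro b hb
      rcases (mem_descInsert k b t).mp hb with rfl | hb
      · omega
      · exact hd b hb

theorem insertBy_pass {α : Type} (before : α → α → Bool) (x : α) (A R : List α)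
    (h : ∀ y ∈ A, before x y = false) :
    PySem.List.insertBy before x (A ++ R) = A ++ PySem.List.insertBy before x R := by
  induction A with
  | nil => simp
  | cons a t ih =>
    have ha : before x a = false := h a (by simp)
    simp [PySem.List.insertBy, ha, ih (fun y hy => h y (by simp [hy]))]

theorem insertBy_front {α : Type} (before : α → α → Bool) (x : α) (L : List α)
    (h : ∀ y ∈ L, before x y = true) :
    PySem.List.insertBy before x L = x :: L := by
  cases L with
  | nil => rfl
  | cons a t => simp [PySem.List.insertBy, h a (by simp)]

-- the key step: inserting one element into a descending-grouped list keeps it grouped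
theorem insertBy_grouped {α : Type} (key : α → Int) (x : α) (D : List Int) (Bk : Int → List α)
    (hkey : ∀ k ∈ D, ∀ y ∈ Bk k, key y = k)
    (hD : D.Pairwise (· > ·))
    (hnew : key x ∉ D → Bk (key x) = []) :
    PySem.List.insertBy (fun a b => decide (key b < key a)) x (D.flatMap Bk) =
      (descInsert (key x) D).flatMap (fun k => Bk k ++ if k = key x then [x] else []) := by
  induction D with
  | nil =>
    simp [descInsert, PySem.List.insertBy, hnew (by simp)]
  | cons d t ih =>
    rcases List.pairwise_cons.mp hD with ⟨hd, ht⟩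
    simp only [descInsert]
    split_ifs with h1 h2
    · -- d < key x : x opens a new front bucket
      have hkx : key x ∉ d :: t := by
        intro hmem
        rcases List.mem_cons.mp hmem with rfl | hmem
        · omega
        · exact absurd (hd _ hmem) (by omega)
      have hfr : PySem.List.insertBy (fun a b => decide (key b < key a)) x ((d :: t).flatMap Bk)
          = x :: (d :: t).flatMap Bk := by
        apply insertBy_front
        intro y hy
        rcases List.mem_flatMap.mp hy with ⟨k, hk, hyk⟩
        have hyk' : key y = k := hkey k hk y hyk
        have hklt : k < key x := by
          rcases List.mem_cons.mp hk with rfl | hk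
          · exact h1
          · exact lt_trans (hd _ hk) h1
        simp [hyk', hklt]
      rw [hfr]
      have hbk : Bk (key x) = [] := hnew hkx
      have hcong : (d :: t).flatMap (fun k => Bk k ++ if k = key x then [x] else [])
          = (d :: t).flatMap Bk := by
        apply List.flatMap_congr
        intro k hk
        have hkne : k ≠ key x := by
          rcases List.mem_cons.mp hk with rfl | hk
          · omega
          · have := hd _ hk; omega
        simp [hkne]
      simp [hbk, hcong]
    · -- d = key x : x joins the end of bucket d
      have hpass : ∀ y ∈ Bk d, (fun a b => decide (key b < key a)) x y = false := by
        intro y hy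
        have hyd : key y = d := hkey d (by simp) y hy
        simp [hyd, h2]
      rw [List.flatMap_cons, insertBy_pass _ _ _ _ hpass]
      have hfr : PySem.List.insertBy (fun a b => decide (key b < key a)) x (t.flatMap Bk)
          = x :: t.flatMap Bk := by
        apply insertBy_front
        intro y hy
        rcases List.mem_flatMap.mp hy with ⟨k, hk, hyk⟩
        have hyk' : key y = k := hkey k (List.mem_cons_of_mem _ hk) y hyk
        have hkd := hd _ hk
        simp [hyk']; omega
      rw [hfr]
      have hcong : t.flatMap (fun k => Bk k ++ if k = key x then [x] else []) = t.flatMap Bk := by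
        apply List.flatMap_congr
        intro k hk
        have hkd := hd _ hk
        have hkne : k ≠ key x := by omega
        simp [hkne]
      simp [hcong, h2]
    · -- key x < d : skip bucket d
      have hpass : ∀ y ∈ Bk d, (fun a b => decide (key b < key a)) x y = false := by
        intro y hy
        have hyd : key y = d := hkey d (by simp) y hy
        simp [hyd]; omega
      rw [List.flatMap_cons, insertBy_pass _ _ _ _ hpass]
      have hnd : d ≠ key x := h2
      have hnotin : key x ∉ t → key x ∉ d :: t := by
        intro hnt hm
        rcases List.mem_cons.mp hm with h | h
        · exact hnd h.symm
        · exact hnt h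
      rw [ih (fun k hk => hkey k (List.mem_cons_of_mem _ hk)) ht (fun hnt => hnew (hnotin hnt))]
      simp [hnd]

-- the running distinct-key list of a left fold of descInsert
theorem foldl_descInsert_pairwise {α : Type} (key : α → Int) (xs : List α) (D : List Int)
    (h : D.Pairwise (· > ·)) :
    (xs.foldl (fun D y => descInsert (key y) D) D).Pairwise (· > ·) := by
  induction xs generalizing D with
  | nil => exact h
  | cons x t ih => exact ih _ (pairwise_descInsert _ _ h)

theorem mem_foldl_descInsert {α : Type} (key : α → Int) (xs : List α) (D : List Int) (a : Int) :
    a ∈ xs.foldl (fun D y => descInsert (key y) D) D ↔ a ∈ D ∨ a ∈ xs.map key := by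
  induction xs generalizing D with
  | nil => simp
  | cons x t ih =>
    simp only [List.foldl_cons, ih, mem_descInsert, List.map_cons, List.mem_cons]
    tauto

-- characterisation of Python's stable reverse sort as descending-key bucket concatenation
theorem sorted_rev_eq_grouped {α : Type} (key : α → Int) (xs : List α) :
    PySem.List.sorted xs key true =
      (xs.foldl (fun D y => descInsert (key y) D) []).flatMap
        (fun k => xs.filter (fun y => key y == k)) := by
  induction xs using List.reverseRecOn with
  | nil => rfl
  | append_singleton xs x ih =>
    rw [PySem.List.sorted_rev_eq_foldl_insertBy, List.foldl_append, List.foldl_cons,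
      List.foldl_nil, ← PySem.List.sorted_rev_eq_foldl_insertBy, ih]
    rw [insertBy_grouped key x _ _
      (fun k _ y hy => eq_of_beq (List.mem_filter.mp hy).2)
      (foldl_descInsert_pairwise key xs [] (by simp))
      (fun hn => by
        apply List.filter_eq_nil_iff.mpr
        intro y hy
        have hmem : key y ∈ xs.map key := List.mem_map_of_mem hy
        have hne : key y ≠ key x := by
          intro he
          exact hn ((mem_foldl_descInsert key xs [] (key x)).mpr (Or.inr (he ▸ hmem)))
        simp [hne])]
    rw [List.foldl_append, List.foldl_cons, List.foldl_nil]
    apply List.flatMap_congr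
    intro k _
    rw [List.filter_append, List.filter_singleton]
    by_cases h : k = key x
    · simp [h]
    · have h' : (key x == k) = false := by simpa using fun he => h he.symm
      simp [h, h']

-- B's descending sorted distinct keys coincide with the fold of descInsert
theorem sorted_keys_eq {α : Type} (key : α → Int) (xs : List α) :
    PySem.List.sorted (PySem.Set.ofList (xs.map key)) (fun k => k) true =
      xs.foldl (fun D y => descInsert (key y) D) [] := by
  apply PySem.List.sorted_rev_eq_of_perm_of_pairwise_gt
  · have hnd : (xs.foldl (fun D y => descInsert (key y) D) []).Nodup := by
      have hp := foldl_descInsert_pairwise key xs [] (by simp)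
      exact hp.imp (fun h => ne_of_gt h)
    refine (List.perm_ext_iff_of_nodup hnd (PySem.Set.nodup_ofList _)).mpr ?_
    intro a
    rw [mem_foldl_descInsert, PySem.Set.mem_ofList]
    simp
  · exact foldl_descInsert_pairwise key xs [] (by simp)

-- a loop that only ever reassigns its Option state to the same value
theorem foldl_const_some {β γ : Type} (l : List γ) (v : β) (init : Option β) (h : l ≠ []) :
    l.foldl (fun _ _ => some v) init = some v := by
  induction l generalizing init with
  | nil => exact absurd rfl h
  | cons a t ih =>
    cases t with
    | nil => rfl
    | cons b u =>
      rw [List.foldl_cons]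
      exact ih _ (by simp)

-- A's outer loop: append the (always-some) inner result at each step
theorem foldl_snoc_some {β : Type} (f : Nat → β) (dflt : β) (l : List Nat) (acc : List β)
    (o : Option β) (g : Option β → Nat → Option β) (hg : ∀ ob i, g ob i = some (f i)) :
    (l.foldl (fun (st : List β × Option β) i => (st.1 ++ [(g st.2 i).getD dflt], g st.2 i))
      (acc, o)).1 = acc ++ l.map f := by
  induction l generalizing acc o with
  | nil => simp
  | cons i t ih =>
    rw [List.foldl_cons, hg, List.map_cons]
    rw [ih]
    simp

theorem map_range_getD {β γ : Type} (xs : List β) (d : β) (f : β → γ) :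
    (List.range xs.length).map (fun i => f (xs.getD i d)) = xs.map f := by
  apply List.ext_getElem (by simp)
  intro i h1 h2
  simp [List.getD_eq_getElem?_getD, List.getElem?_eq_getElem (by simpa using h2)]

-- A computes the stable reverse sort of every sublist
theorem A_eq (lst : List (List String)) :
    varyiing lst = lst.map (fun sub =>
      PySem.List.sorted sub (fun x => (PySem.Str.count x "a" : Int)) true) := by
  unfold varyiing
  cases lst with
  | nil => rfl
  | cons s t =>
    have hne : List.range (s :: t).length ≠ [] := by simp
    rw [foldl_snoc_some
      (fun i => PySem.List.sorted ((s :: t).getD i []) (fun x => (PySem.Str.count x "a" : Int)) true)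
      [] (List.range (s :: t).length) [] none
      (fun ob i => (List.range (s :: t).length).foldl
        (fun _ _ => some (PySem.List.sorted ((s :: t).getD i [])
          (fun x => (PySem.Str.count x "a" : Int)) true)) ob)
      (fun ob i => foldl_const_some _ _ _ hne)]
    rw [List.nil_append]
    exact map_range_getD (s :: t) []
      (fun sub => PySem.List.sorted sub (fun x => (PySem.Str.count x "a" : Int)) true)

-- B, per sublist, computes the stable reverse sort
theorem alt_sub_eq (sub : List String) :
    (PySem.List.sorted
        ((sub.foldl (fun d x => d.modify ((PySem.Str.count x "a" : Int)) [] (· ++ [x]))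
          PySem.Dict.empty).keys) (fun k => k) true).flatMap
      (fun k => (sub.foldl (fun d x => d.modify ((PySem.Str.count x "a" : Int)) [] (· ++ [x]))
          PySem.Dict.empty).getD k []) =
    PySem.List.sorted sub (fun x => (PySem.Str.count x "a" : Int)) true := by
  have hkeys : (sub.foldl (fun d x => d.modify ((PySem.Str.count x "a" : Int)) [] (· ++ [x]))
      PySem.Dict.empty).keys = PySem.Set.ofList (sub.map (fun x => (PySem.Str.count x "a" : Int))) := by
    rw [PySem.Dict.keys_foldl_modify_key sub (fun x => (PySem.Str.count x "a" : Int)) []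
      (fun _ x => (· ++ [x])) PySem.Dict.empty]
    rfl
  have hgetD : ∀ k, (sub.foldl (fun d x => d.modify ((PySem.Str.count x "a" : Int)) [] (· ++ [x]))
      PySem.Dict.empty).getD k [] = sub.filter (fun y => (PySem.Str.count y "a" : Int) == k) := by
    intro k
    have h := PySem.Dict.getD_foldl_modify_append
      (sub.map (fun x => ((PySem.Str.count x "a" : Int), x))) PySem.Dict.empty k
    rw [List.foldl_map] at h
    simpa [List.filter_map, Function.comp_def] using h
  rw [hkeys, sorted_keys_eq, sorted_rev_eq_grouped]
  apply List.flatMap_congr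
  intro k _
  exact hgetD k

-- ===== VERDICT (by name: the statement is the Claim_ definition above) =====
theorem varyiing_spec : Claim_equal_varyiing := by
  intro lst _
  unfold Spec_varyiing
  rw [A_eq]
  unfold varyiing_alt
  exact (List.map_congr_left (fun sub _ => alt_sub_eq sub)).symm
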